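-- pv_equiv track=rewrite | github.com/cszhu/airscribe | airscribe.py | get_qanda
-- ===== SOURCE A (Python) =====
-- def get_qanda(sentences, spoken_questions):
-- 	qanda = {}
-- 	curr_question = None
-- 	response = "" # usually an answer
-- 	for sentence in sentences:
-- 		# new question
-- 		isQuestion = False
-- 		for spq in spoken_questions:
-- 			if edit_distance(sentence.lower(), spq) == 0:
-- 				isQuestion = True
-- 				# deal with prev question
-- 				if curr_question:
-- 					qanda[curr_question] = response
-- 				curr_question = spq[0].upper() + spq[1:]
-- 				response = ""
-- 		# sentence is not a question
-- 		if not isQuestion: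
-- 			response += sentence + ". "
-- 	# last question
-- 	if curr_question:
-- 		qanda[curr_question] = response
-- 	return qanda
--
-- def edit_distance(s1, s2):
--     m=len(s1)+1
--     n=len(s2)+1
--
--     tbl = {}
--     for i in range(m): tbl[i,0]=i
--     for j in range(n): tbl[0,j]=j
--     for i in range(1, m):
--         for j in range(1, n):
--             cost = 0 if s1[i-1] == s2[j-1] else 1
--             tbl[i,j] = min(tbl[i, j-1]+1, tbl[i-1, j]+1, tbl[i-1, j-1]+cost)
--
--     return tbl[i,j]
-- ===== SOURCE B (Python) =====
-- def get_qanda(sentences, spoken_questions):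
--     question_set = set(spoken_questions)
--     qanda = {}
--     curr = None
--     response = ""
--     for sentence in sentences:
--         low = sentence.lower()
--         if low in question_set:
--             if curr is not None:
--                 qanda[curr] = response
--             curr = low[0].upper() + low[1:]
--             response = ""
--         else:
--             response += sentence + ". "
--     if curr is not None:
--         qanda[curr] = response
--     return qanda
-- ===== Notes on version B (the rewrite author's own statement) =====
-- stated objective: faster
-- what changed: B precomputes a hash set of spoken_questions and tests each lowered sentence by one set-membership lookup, replacing A's inner loop that runs an O(L^2) dynamic-programming edit distance (used only as an equality test) against every question for every sentence.
import Mathlib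
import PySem

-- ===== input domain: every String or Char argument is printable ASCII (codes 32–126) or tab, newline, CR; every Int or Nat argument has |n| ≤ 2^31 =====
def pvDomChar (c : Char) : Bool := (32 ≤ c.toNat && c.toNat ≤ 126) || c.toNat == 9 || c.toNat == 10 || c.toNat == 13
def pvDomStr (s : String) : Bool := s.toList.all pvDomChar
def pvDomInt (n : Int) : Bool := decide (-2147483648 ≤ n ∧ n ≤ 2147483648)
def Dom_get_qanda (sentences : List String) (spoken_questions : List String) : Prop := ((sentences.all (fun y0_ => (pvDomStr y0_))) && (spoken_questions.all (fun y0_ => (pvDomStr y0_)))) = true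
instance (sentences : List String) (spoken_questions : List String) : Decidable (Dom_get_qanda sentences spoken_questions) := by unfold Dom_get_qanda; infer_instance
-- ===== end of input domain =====

-- B replaces A's per-sentence edit-distance scan of all questions by one hash-set membership test (objective: faster).

-- ===== PORT A =====
-- spq[0].upper() + spq[1:], computed on the char list (exact); for s = "" Python raises IndexError — excluded by Pre_.
-- (shared by both ports: both Pythons contain this exact expression)
def pyCapitalize (s : String) : String :=
  match PySem.Str.pyGet? s 0 with
  | some c => String.ofList (PySem.Chars.upper [c] ++ s.toList.drop 1)
  | none => ""

-- literal port of A's edit_distance: the full DP table as a dict keyed by (i, j)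
def edit_distance (s1 s2 : String) : Int :=
  let m : Int := PySem.Str.len s1 + 1
  let n : Int := PySem.Str.len s2 + 1
  let tbl : PySem.Dict (Int × Int) Int := PySem.Dict.empty
  let tbl := (PySem.List.pyRange 0 m 1).foldl (fun t i => t.insert (i, 0) i) tbl
  let tbl := (PySem.List.pyRange 0 n 1).foldl (fun t j => t.insert (0, j) j) tbl
  let tbl := (PySem.List.pyRange 1 m 1).foldl (fun t i =>
      (PySem.List.pyRange 1 n 1).foldl (fun t j =>
        let cost : Int := if PySem.Str.pyGet? s1 (i - 1) = PySem.Str.pyGet? s2 (j - 1) then 0 else 1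
        t.insert (i, j)
          (min (min (t.getD (i, j - 1) 0 + 1) (t.getD (i - 1, j) 0 + 1))
               (t.getD (i - 1, j - 1) 0 + cost))) t) tbl
  -- Python reads tbl[i, j] with the loop variables left at i = m-1, j = n-1; that key is
  -- always present (proved below), so getD's default is never taken (Python would KeyError).
  tbl.getD (m - 1, n - 1) 0

-- 'if curr_question: qanda[curr_question] = response' — truthy = non-None and non-empty
def aFlush (d : PySem.Dict String String) (c : Option String) (r : String) : PySem.Dict String String :=
  match c with
  | some q => if q = "" then d else d.insert q r
  | none => d

-- body of A's inner 'for spq in spoken_questions' loop; state = (isQuestion, qanda, curr_question, response)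
def aInnerStep (low : String) (t : Bool × PySem.Dict String String × Option String × String)
    (spq : String) : Bool × PySem.Dict String String × Option String × String :=
  if edit_distance low spq = 0 then
    (true, aFlush t.2.1 t.2.2.1 t.2.2.2, some (pyCapitalize spq), "")
  else t

-- body of A's outer 'for sentence in sentences' loop
def aSentStep (spoken_questions : List String)
    (st : PySem.Dict String String × Option String × String) (sentence : String) :
    PySem.Dict String String × Option String × String :=
  let inner := spoken_questions.foldl (aInnerStep (PySem.Str.lower sentence)) (false, st)
  if inner.1 then inner.2 else (inner.2.1, inner.2.2.1, inner.2.2.2 ++ (sentence ++ ". "))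

def get_qanda (sentences : List String) (spoken_questions : List String) : List (String × String) :=
  match sentences.foldl (aSentStep spoken_questions) (PySem.Dict.empty, none, "") with
  | (d, c, r) => (aFlush d c r).items

-- ===== PORT B =====
-- 'if curr is not None: qanda[curr] = response'
def bFlush (d : PySem.Dict String String) (c : Option String) (r : String) : PySem.Dict String String :=
  match c with
  | some q => d.insert q r
  | none => d

-- body of B's single 'for sentence in sentences' loop: one set-membership test per sentence
def bSentStep (question_set : PySem.Set String)
    (st : PySem.Dict String String × Option String × String) (sentence : String) :
    PySem.Dict String String × Option String × String :=
  let low := PySem.Str.lower sentence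
  if PySem.Set.contains question_set low then
    (bFlush st.1 st.2.1 st.2.2, some (pyCapitalize low), "")
  else (st.1, st.2.1, st.2.2 ++ (sentence ++ ". "))

def get_qanda_alt (sentences : List String) (spoken_questions : List String) : List (String × String) :=
  match sentences.foldl (bSentStep (PySem.Set.ofList spoken_questions)) (PySem.Dict.empty, none, "") with
  | (d, c, r) => (bFlush d c r).items

-- ===== PRECONDITION & SPEC =====
-- Pre_ excludes exactly the inputs where A raises: an empty sentence matching an empty spoken
-- question makes A (and B) raise IndexError on spq[0].
def Pre_get_qanda (sentences : List String) (spoken_questions : List String) : Prop :=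
  ¬ ("" ∈ sentences ∧ "" ∈ spoken_questions)
instance (sentences : List String) (spoken_questions : List String) : Decidable (Pre_get_qanda sentences spoken_questions) := by unfold Pre_get_qanda; infer_instance

def pvWitness_get_qanda : List String × List String :=
  (["what time is it", "noon", "bye"], ["what time is it"])

def Spec_get_qanda (sentences : List String) (spoken_questions : List String) (out : List (String × String)) : Prop := out = get_qanda_alt sentences spoken_questions
instance (sentences : List String) (spoken_questions : List String) (out : List (String × String)) : Decidable (Spec_get_qanda sentences spoken_questions out) := by unfold Spec_get_qanda; infer_instance

-- ===== CLAIM (what is proved, stated in full; the proofs are below) =====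
def Claim_equal_get_qanda : Prop := ∀ (sentences : List String) (spoken_questions : List String), Dom_get_qanda sentences spoken_questions → Pre_get_qanda sentences spoken_questions → Spec_get_qanda sentences spoken_questions (get_qanda sentences spoken_questions)

-- ===== LEMMAS AND PROOFS =====

-- generic invariant rule for a fold over range(a, b)
theorem foldlRangeInv {σ : Type} (Q : Int → σ → Prop) (f : σ → Int → σ)
    (a b : Int) (hab : a ≤ b) (s : σ) (h0 : Q a s)
    (hstep : ∀ i t, a ≤ i → i < b → Q i t → Q (i + 1) (f t i)) :
    Q b ((PySem.List.pyRange a b 1).foldl f s) := by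
  obtain ⟨n, hn⟩ : ∃ n : Nat, b = a + n := ⟨(b - a).toNat, by omega⟩
  subst hn
  induction n generalizing a s with
  | zero => simpa [PySem.List.pyRange_one_eq_nil] using h0
  | succ k ih =>
      rw [PySem.List.pyRange_one_cons (by omega)]
      simp only [List.foldl_cons]
      have h1 : a + (↑(k + 1) : Int) = (a + 1) + (↑k : Int) := by push_cast; ring
      rw [h1]
      exact ih (a + 1) (f s a)
        (hstep a s le_rfl (by push_cast; omega) h0) (by omega)
        (fun i t hi hib hq => hstep i t (by omega) (by rw [h1]; exact hib) hq)

-- cell property of A's DP table: nonnegative, and zero exactly on matching equal prefixes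
def CellP (c1 c2 : List Char) (i j v : Int) : Prop :=
  0 ≤ v ∧ (v = 0 ↔ i = j ∧ c1.take i.toNat = c2.take j.toNat)

def TblOk (c1 c2 : List Char) (t : PySem.Dict (Int × Int) Int) : Prop :=
  ∀ p v, t.get? p = some v → CellP c1 c2 p.1 p.2 v

def HasKey (t : PySem.Dict (Int × Int) Int) (i j : Int) : Prop :=
  (t.get? (i, j)).isSome

theorem tblok_insert {c1 c2 : List Char} {t : PySem.Dict (Int × Int) Int} (h : TblOk c1 c2 t)
    (i j v : Int) (hv : CellP c1 c2 i j v) : TblOk c1 c2 (t.insert (i, j) v) := by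
  intro p w hw
  rw [PySem.Dict.get?_insert] at hw
  split at hw
  · rename_i hp; cases hw; subst hp; exact hv
  · exact h p w hw

theorem haskey_insert {t : PySem.Dict (Int × Int) Int} {a b : Int} (h : HasKey t a b)
    (k : Int × Int) (v : Int) : HasKey (t.insert k v) a b := by
  unfold HasKey at *
  rw [PySem.Dict.get?_insert]
  split <;> simp_all

theorem getD_of_hasKey {c1 c2 : List Char} {t : PySem.Dict (Int × Int) Int}
    (hok : TblOk c1 c2 t) {i j : Int} (h : HasKey t i j) :
    CellP c1 c2 i j (t.getD (i, j) 0) := by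
  unfold HasKey at h
  obtain ⟨v, hv⟩ := Option.isSome_iff_exists.mp h
  rw [PySem.Dict.getD_eq_get?_getD, hv]
  exact hok _ v hv

theorem haskey_insert_self (t : PySem.Dict (Int × Int) Int) (i j v : Int) :
    HasKey (t.insert (i, j) v) i j := by
  unfold HasKey
  rw [PySem.Dict.get?_insert]
  simp

-- the border rows: tbl[i,0] = i and tbl[0,j] = j satisfy CellP
theorem cellP_border_row (c1 c2 : List Char) (i : Int) (hi : 0 ≤ i) : CellP c1 c2 i 0 i := by
  refine ⟨hi, ?_, ?_⟩
  · intro h0; exact ⟨h0, by simp [h0]⟩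
  · rintro ⟨h0, -⟩; exact h0

theorem cellP_border_col (c1 c2 : List Char) (j : Int) (hj : 0 ≤ j) : CellP c1 c2 0 j j := by
  refine ⟨hj, ?_, ?_⟩
  · intro h0; exact ⟨h0.symm, by simp [h0]⟩
  · rintro ⟨h0, -⟩; exact h0.symm

-- the DP recurrence preserves CellP
theorem cell_step (s1 s2 : String) (t : PySem.Dict (Int × Int) Int)
    (hok : TblOk s1.toList s2.toList t) (i j : Int)
    (hi1 : 1 ≤ i) (hj1 : 1 ≤ j)
    (hl : HasKey t i (j - 1)) (hu : HasKey t (i - 1) j) (hdg : HasKey t (i - 1) (j - 1)) :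
    CellP s1.toList s2.toList i j
      (min (min (t.getD (i, j - 1) 0 + 1) (t.getD (i - 1, j) 0 + 1))
           (t.getD (i - 1, j - 1) 0 +
             (if PySem.Str.pyGet? s1 (i - 1) = PySem.Str.pyGet? s2 (j - 1) then 0 else 1))) := by
  obtain ⟨hl0, -⟩ := getD_of_hasKey hok hl
  obtain ⟨hu0, -⟩ := getD_of_hasKey hok hu
  obtain ⟨hd0, hdz⟩ := getD_of_hasKey hok hdg
  set vl := t.getD (i, j - 1) 0 with hvl
  set vu := t.getD (i - 1, j) 0 with hvu
  set vd := t.getD (i - 1, j - 1) 0 with hvd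
  have e1 : PySem.Str.pyGet? s1 (i - 1) = s1.toList[(i - 1).toNat]? := by
    rw [show (i - 1) = (((i - 1).toNat : Nat) : Int) by omega]
    simp [pysem]
  have e2 : PySem.Str.pyGet? s2 (j - 1) = s2.toList[(j - 1).toNat]? := by
    rw [show (j - 1) = (((j - 1).toNat : Nat) : Int) by omega]
    simp [pysem]
  set cost : Int := (if PySem.Str.pyGet? s1 (i - 1) = PySem.Str.pyGet? s2 (j - 1) then 0 else 1)
    with hcost
  have hcost01 : cost = 0 ∨ cost = 1 := by rw [hcost]; split <;> simp
  have hcost_iff : cost = 0 ↔ s1.toList[(i - 1).toNat]? = s2.toList[(j - 1).toNat]? := by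
    rw [hcost, e1, e2]
    split <;> simp_all
  have hit : i.toNat = (i - 1).toNat + 1 := by omega
  have hjt : j.toNat = (j - 1).toNat + 1 := by omega
  have hnn : 0 ≤ min (min (vl + 1) (vu + 1)) (vd + cost) :=
    le_min (le_min (by omega) (by omega)) (by rcases hcost01 with h | h <;> omega)
  refine ⟨hnn, ?_, ?_⟩
  · intro h0
    have hge : (1 : Int) ≤ min (vl + 1) (vu + 1) := le_min (by omega) (by omega)
    have hmin2 : min (min (vl + 1) (vu + 1)) (vd + cost) ≤ vd + cost := min_le_right _ _
    have hmin1 : min (min (vl + 1) (vu + 1)) (vd + cost) = min (vl + 1) (vu + 1)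
        ∨ min (min (vl + 1) (vu + 1)) (vd + cost) = vd + cost := min_choice _ _
    have hdc : vd + cost = 0 := by
      rcases hmin1 with h | h <;> omega
    have hvd0 : vd = 0 ∧ cost = 0 := by rcases hcost01 with h | h <;> omega
    obtain ⟨hij, htake⟩ := hdz.mp hvd0.1
    have hopt := hcost_iff.mp hvd0.2
    have hijn : i = j := by omega
    refine ⟨hijn, ?_⟩
    have hjt' : (j - 1).toNat = (i - 1).toNat := by omega
    have htake2 : List.take (i - 1).toNat s1.toList = List.take (i - 1).toNat s2.toList := by
      rw [htake, hjt']
    have hopt2 : s1.toList[(i - 1).toNat]? = s2.toList[(i - 1).toNat]? := by rw [hopt, hjt']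
    rw [hit, hjt, List.take_add_one, List.take_add_one, hjt', htake2, hopt2]
  · rintro ⟨hij, htake⟩
    have hij1 : i - 1 = j - 1 := by omega
    have hjt' : (j - 1).toNat = (i - 1).toNat := by omega
    have htake' : s1.toList.take (i - 1).toNat = s2.toList.take (j - 1).toNat := by
      have h := congrArg (List.take (i - 1).toNat) htake
      rw [List.take_take, List.take_take] at h
      rw [show min (i - 1).toNat i.toNat = (i - 1).toNat by omega] at h
      rw [show min (i - 1).toNat j.toNat = (i - 1).toNat by omega] at h
      rw [h, hjt']
    have hvd0 : vd = 0 := hdz.mpr ⟨hij1, htake'⟩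
    have hopt : s1.toList[(i - 1).toNat]? = s2.toList[(j - 1).toNat]? := by
      have h1 : s1.toList[(i - 1).toNat]? = (s1.toList.take i.toNat)[(i - 1).toNat]? :=
        (List.getElem?_take_of_lt (by omega)).symm
      have h2 : s2.toList[(j - 1).toNat]? = (s2.toList.take j.toNat)[(j - 1).toNat]? :=
        (List.getElem?_take_of_lt (by omega)).symm
      rw [h1, h2, htake, hjt']
    have hcost0 : cost = 0 := hcost_iff.mpr hopt
    have : min (min (vl + 1) (vu + 1)) (vd + cost) ≤ 0 := by
      have := min_le_right (min (vl + 1) (vu + 1)) (vd + cost)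
      omega
    omega

-- the first border loop: for i in range(m): tbl[i,0] = i
theorem stage1 (c1 c2 : List Char) (m : Int) (hm : 0 ≤ m) :
    TblOk c1 c2 ((PySem.List.pyRange 0 m 1).foldl (fun t i => t.insert (i, 0) i) PySem.Dict.empty)
    ∧ ∀ i : Int, 0 ≤ i → i < m →
        HasKey ((PySem.List.pyRange 0 m 1).foldl (fun t i => t.insert (i, 0) i) PySem.Dict.empty) i 0 := by
  have h := foldlRangeInv
    (Q := fun b t => TblOk c1 c2 t ∧ ∀ i : Int, 0 ≤ i → i < b → HasKey t i 0)
    (f := fun t i => t.insert (i, 0) i) 0 m hm PySem.Dict.empty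
    ⟨fun p v hv => by { rw [PySem.Dict.get?_empty] at hv; cases hv }, fun i h1 h2 => by omega⟩
    (fun i t h0i hib ⟨hok, hhas⟩ => by
      refine ⟨tblok_insert hok i 0 i (cellP_border_row c1 c2 i h0i), ?_⟩
      intro i' h1 h2
      by_cases hii : i' = i
      · subst hii; exact haskey_insert_self t i' 0 i'
      · exact haskey_insert (hhas i' h1 (by omega)) _ _)
  exact h

-- the second border loop: for j in range(n): tbl[0,j] = j
theorem stage2 (c1 c2 : List Char) (n : Int) (hn : 0 ≤ n)
    (t0 : PySem.Dict (Int × Int) Int) (h0 : TblOk c1 c2 t0)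
    (P : Int → Int → Prop) (hP : ∀ a b, P a b → HasKey t0 a b) :
    TblOk c1 c2 ((PySem.List.pyRange 0 n 1).foldl (fun t j => t.insert (0, j) j) t0)
    ∧ (∀ a b, P a b → HasKey ((PySem.List.pyRange 0 n 1).foldl (fun t j => t.insert (0, j) j) t0) a b)
    ∧ ∀ j : Int, 0 ≤ j → j < n →
        HasKey ((PySem.List.pyRange 0 n 1).foldl (fun t j => t.insert (0, j) j) t0) 0 j := by
  have h := foldlRangeInv
    (Q := fun b t => TblOk c1 c2 t ∧ (∀ x y, P x y → HasKey t x y)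
      ∧ ∀ j : Int, 0 ≤ j → j < b → HasKey t 0 j)
    (f := fun t j => t.insert (0, j) j) 0 n hn t0
    ⟨h0, hP, fun j h1 h2 => by omega⟩
    (fun j t h0j hjb ⟨hok, hkeep, hhas⟩ => by
      refine ⟨tblok_insert hok 0 j j (cellP_border_col c1 c2 j h0j),
        fun x y hxy => haskey_insert (hkeep x y hxy) _ _, ?_⟩
      intro j' h1 h2
      by_cases hjj : j' = j
      · subst hjj; exact haskey_insert_self t 0 j' j'
      · exact haskey_insert (hhas j' h1 (by omega)) _ _)
  exact h

-- the main double loop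
theorem stage3 (s1 s2 : String) (m n : Int)
    (hm : m = (s1.toList.length : Int) + 1) (hn : n = (s2.toList.length : Int) + 1)
    (t0 : PySem.Dict (Int × Int) Int) (h0 : TblOk s1.toList s2.toList t0)
    (hb1 : ∀ i : Int, 0 ≤ i → i < m → HasKey t0 i 0)
    (hb2 : ∀ j : Int, 0 ≤ j → j < n → HasKey t0 0 j) :
    TblOk s1.toList s2.toList
      ((PySem.List.pyRange 1 m 1).foldl (fun t i =>
        (PySem.List.pyRange 1 n 1).foldl (fun t j =>
          let cost : Int := if PySem.Str.pyGet? s1 (i - 1) = PySem.Str.pyGet? s2 (j - 1) then 0 else 1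
          t.insert (i, j)
            (min (min (t.getD (i, j - 1) 0 + 1) (t.getD (i - 1, j) 0 + 1))
                 (t.getD (i - 1, j - 1) 0 + cost))) t) t0)
    ∧ HasKey
      ((PySem.List.pyRange 1 m 1).foldl (fun t i =>
        (PySem.List.pyRange 1 n 1).foldl (fun t j =>
          let cost : Int := if PySem.Str.pyGet? s1 (i - 1) = PySem.Str.pyGet? s2 (j - 1) then 0 else 1
          t.insert (i, j)
            (min (min (t.getD (i, j - 1) 0 + 1) (t.getD (i - 1, j) 0 + 1))
                 (t.getD (i - 1, j - 1) 0 + cost))) t) t0)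
      (m - 1) (n - 1) := by
  have hQ := foldlRangeInv
    (Q := fun i t => TblOk s1.toList s2.toList t
      ∧ (∀ a : Int, 0 ≤ a → a < m → HasKey t a 0)
      ∧ (∀ b : Int, 0 ≤ b → b < n → HasKey t 0 b)
      ∧ (∀ a b : Int, 1 ≤ a → a < i → 1 ≤ b → b < n → HasKey t a b))
    (f := fun t i =>
        (PySem.List.pyRange 1 n 1).foldl (fun t j =>
          let cost : Int := if PySem.Str.pyGet? s1 (i - 1) = PySem.Str.pyGet? s2 (j - 1) then 0 else 1
          t.insert (i, j)
            (min (min (t.getD (i, j - 1) 0 + 1) (t.getD (i - 1, j) 0 + 1))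
                 (t.getD (i - 1, j - 1) 0 + cost))) t)
    1 m (by omega) t0
    ⟨h0, hb1, hb2, fun a b h1 h2 h3 h4 => by omega⟩
    (fun i t h1i him ⟨hok, hr1, hr2, hrows⟩ => by
      -- inner loop over j
      have hR := foldlRangeInv
        (Q := fun j t => TblOk s1.toList s2.toList t
          ∧ (∀ a : Int, 0 ≤ a → a < m → HasKey t a 0)
          ∧ (∀ b : Int, 0 ≤ b → b < n → HasKey t 0 b)
          ∧ (∀ a b : Int, 1 ≤ a → a < i → 1 ≤ b → b < n → HasKey t a b)
          ∧ (∀ b : Int, 1 ≤ b → b < j → HasKey t i b))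
        (f := fun t j =>
          let cost : Int := if PySem.Str.pyGet? s1 (i - 1) = PySem.Str.pyGet? s2 (j - 1) then 0 else 1
          t.insert (i, j)
            (min (min (t.getD (i, j - 1) 0 + 1) (t.getD (i - 1, j) 0 + 1))
                 (t.getD (i - 1, j - 1) 0 + cost)))
        1 n (by omega) t
        ⟨hok, hr1, hr2, hrows, fun b h1 h2 => by omega⟩
        (fun j t' h1j hjn ⟨hok', hr1', hr2', hrows', hrow'⟩ => by
          have hl : HasKey t' i (j - 1) := by
            by_cases hj1 : j = 1
            · rw [hj1]; simpa using hr1' i (by omega) him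
            · exact hrow' (j - 1) (by omega) (by omega)
          have hu : HasKey t' (i - 1) j := by
            by_cases hi1 : i = 1
            · rw [hi1]; simpa using hr2' j (by omega) hjn
            · exact hrows' (i - 1) j (by omega) (by omega) h1j hjn
          have hdg : HasKey t' (i - 1) (j - 1) := by
            by_cases hi1 : i = 1
            · rw [hi1]; simpa using hr2' (j - 1) (by omega) (by omega)
            · by_cases hj1 : j = 1
              · rw [hj1]; simpa using hr1' (i - 1) (by omega) (by omega)
              · exact hrows' (i - 1) (j - 1) (by omega) (by omega) (by omega) (by omega)
          have hcell := cell_step s1 s2 t' hok' i j h1i h1j hl hu hdg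
          refine ⟨tblok_insert hok' i j _ hcell,
            fun a h1 h2 => haskey_insert (hr1' a h1 h2) _ _,
            fun b h1 h2 => haskey_insert (hr2' b h1 h2) _ _,
            fun a b h1 h2 h3 h4 => haskey_insert (hrows' a b h1 h2 h3 h4) _ _, ?_⟩
          intro b h1 h2
          by_cases hbj : b = j
          · subst hbj; exact haskey_insert_self t' i b _
          · exact haskey_insert (hrow' b h1 (by omega)) _ _)
      obtain ⟨hok2, hr12, hr22, hrows2, hrow2⟩ := hR
      refine ⟨hok2, hr12, hr22, ?_⟩
      intro a b h1 h2 h3 h4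
      by_cases hai : a = i
      · subst hai; exact hrow2 b h3 h4
      · exact hrows2 a b h1 (by omega) h3 h4)
  obtain ⟨hok, hr1, hr2, hrows⟩ := hQ
  refine ⟨hok, ?_⟩
  by_cases hm0 : m = 1
  · rw [show m - 1 = 0 by omega]
    exact hr2 (n - 1) (by omega) (by omega)
  · by_cases hn0 : n = 1
    · rw [show n - 1 = 0 by omega]
      exact hr1 (m - 1) (by omega) (by omega)
    · exact hrows (m - 1) (n - 1) (by omega) (by omega) (by omega) (by omega)

theorem edit_distance_eq_zero_iff (s1 s2 : String) :
    edit_distance s1 s2 = 0 ↔ s1 = s2 := by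
  have hlen1 : PySem.Str.len s1 = (s1.toList.length : Int) := by simp [pysem]
  have hlen2 : PySem.Str.len s2 = (s2.toList.length : Int) := by simp [pysem]
  set m : Int := PySem.Str.len s1 + 1 with hmdef
  set n : Int := PySem.Str.len s2 + 1 with hndef
  have hED : edit_distance s1 s2 =
      ((PySem.List.pyRange 1 m 1).foldl (fun t i =>
        (PySem.List.pyRange 1 n 1).foldl (fun t j =>
          let cost : Int := if PySem.Str.pyGet? s1 (i - 1) = PySem.Str.pyGet? s2 (j - 1) then 0 else 1
          t.insert (i, j)
            (min (min (t.getD (i, j - 1) 0 + 1) (t.getD (i - 1, j) 0 + 1))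
                 (t.getD (i - 1, j - 1) 0 + cost))) t)
        ((PySem.List.pyRange 0 n 1).foldl (fun t j => t.insert (0, j) j)
          ((PySem.List.pyRange 0 m 1).foldl (fun t i => t.insert (i, 0) i)
            PySem.Dict.empty))).getD (m - 1, n - 1) 0 := rfl
  obtain ⟨hok1, hhas1⟩ := stage1 s1.toList s2.toList m (by omega)
  obtain ⟨hok2, hkeep2, hhas2⟩ := stage2 s1.toList s2.toList n (by omega)
    _ hok1
    (fun a b => 0 ≤ a ∧ a < m ∧ b = 0)
    (fun a b ⟨h1, h2, h3⟩ => h3 ▸ hhas1 a h1 h2)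
  obtain ⟨hok3, hhas3⟩ := stage3 s1 s2 m n (by omega) (by omega) _ hok2
    (fun i h1 h2 => hkeep2 i 0 ⟨h1, h2, rfl⟩) hhas2
  have hcell := getD_of_hasKey hok3 hhas3
  rw [hED]
  obtain ⟨-, hiff⟩ := hcell
  rw [hiff]
  have e1 : m - 1 = ((s1.toList.length : Nat) : Int) := by omega
  have e2 : n - 1 = ((s2.toList.length : Nat) : Int) := by omega
  rw [e1, e2]
  simp only [Int.toNat_natCast, Nat.cast_inj, List.take_length]
  constructor
  · rintro ⟨-, h⟩
    rw [← String.ofList_toList (s := s1), h, String.ofList_toList]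
  · intro h
    subst h
    exact ⟨rfl, rfl⟩

-- ---- facts about strings used by the main proof ----
theorem lower_eq_empty {s : String} (h : PySem.Str.lower s = "") : s = "" := by
  have h1 : (PySem.Str.lower s).toList = [] := by rw [h]; rfl
  rw [PySem.Str.toList_lower] at h1
  simp only [PySem.Chars.lower, List.map_eq_nil_iff] at h1
  exact String.toList_eq_nil_iff.mp h1

theorem cap_ne_empty {s : String} (h : s ≠ "") : pyCapitalize s ≠ "" := by
  have hl : s.toList ≠ [] := fun hn => h (String.toList_eq_nil_iff.mp hn)
  obtain ⟨c, cs, hcs⟩ := List.exists_cons_of_ne_nil hl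
  have h0 : PySem.Str.pyGet? s 0 = some c := by simp [pysem, hcs]
  unfold pyCapitalize
  rw [h0]
  intro hcontra
  have h2 := congrArg String.toList hcontra
  rw [String.toList_ofList] at h2
  simp [PySem.Chars.upper] at h2

-- ---- the relation between A's and B's loop states ----
def OkC (c : Option String) : Prop := ∀ q, c = some q → q ≠ ""

def StRel (x y : PySem.Dict String String × Option String × String) : Prop :=
  x.2.1 = y.2.1 ∧ x.2.2 = y.2.2 ∧ OkC x.2.1 ∧
  (x.1 = y.1 ∨ ∃ q, x.2.1 = some q ∧ q ≠ "" ∧ x.1 = y.1.insert q "")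

theorem flush_eq {d : PySem.Dict String String} {c : Option String} {r : String}
    (h : OkC c) : aFlush d c r = bFlush d c r := by
  cases c with
  | none => rfl
  | some q =>
      simp only [aFlush, bFlush]
      rw [if_neg (h q rfl)]

theorem innerStep_no {low spq : String} (h : spq ≠ low)
    (t : Bool × PySem.Dict String String × Option String × String) :
    aInnerStep low t spq = t := by
  unfold aInnerStep
  rw [if_neg]
  intro h0
  exact h ((edit_distance_eq_zero_iff low spq).mp h0).symm

theorem inner_no {low : String} {qs : List String} (h : low ∉ qs)
    (t : Bool × PySem.Dict String String × Option String × String) :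
    qs.foldl (aInnerStep low) t = t := by
  induction qs generalizing t with
  | nil => rfl
  | cons spq qs ih =>
      simp only [List.foldl_cons]
      rw [innerStep_no (fun he => h (List.mem_cons.mpr (Or.inl he.symm))) t]
      exact ih (fun hm => h (List.mem_cons_of_mem _ hm)) t

theorem inner_after {low : String} (qs : List String) (hQ : pyCapitalize low ≠ "")
    (d : PySem.Dict String String) :
    ∃ d', qs.foldl (aInnerStep low) (true, d, some (pyCapitalize low), "")
            = (true, d', some (pyCapitalize low), "")
      ∧ (d' = d ∨ d' = d.insert (pyCapitalize low) "") := by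
  induction qs generalizing d with
  | nil => exact ⟨d, rfl, Or.inl rfl⟩
  | cons spq qs ih =>
      simp only [List.foldl_cons]
      by_cases hsp : spq = low
      · have hstep : aInnerStep low (true, d, some (pyCapitalize low), "") spq
            = (true, d.insert (pyCapitalize low) "", some (pyCapitalize low), "") := by
          unfold aInnerStep
          rw [if_pos ((edit_distance_eq_zero_iff low spq).mpr hsp.symm), hsp]
          simp only [aFlush]
          rw [if_neg hQ]
        rw [hstep]
        obtain ⟨d', h1, h2⟩ := ih (d.insert (pyCapitalize low) "")
        refine ⟨d', h1, Or.inr ?_⟩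
        rcases h2 with h2 | h2
        · exact h2
        · rw [h2, PySem.Dict.insert_insert_self]
      · rw [innerStep_no hsp]
        exact ih d

theorem inner_mem {low : String} {qs : List String} (h : low ∈ qs) (hQ : pyCapitalize low ≠ "")
    (d : PySem.Dict String String) (c : Option String) (r : String) :
    ∃ d', qs.foldl (aInnerStep low) (false, d, c, r) = (true, d', some (pyCapitalize low), "")
      ∧ (d' = aFlush d c r ∨ d' = (aFlush d c r).insert (pyCapitalize low) "") := by
  induction qs with
  | nil => cases h
  | cons spq qs ih =>
      simp only [List.foldl_cons]
      by_cases hsp : spq = low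
      · have hstep : aInnerStep low (false, d, c, r) spq
            = (true, aFlush d c r, some (pyCapitalize low), "") := by
          unfold aInnerStep
          rw [if_pos ((edit_distance_eq_zero_iff low spq).mpr hsp.symm), hsp]
        rw [hstep]
        exact inner_after qs hQ (aFlush d c r)
      · rw [innerStep_no hsp]
        exact ih ((List.mem_cons.mp h).resolve_left (fun he => hsp he.symm))

theorem final_eq {x y : PySem.Dict String String × Option String × String} (h : StRel x y) :
    aFlush x.1 x.2.1 x.2.2 = bFlush y.1 y.2.1 y.2.2 := by
  obtain ⟨hc, hr, hok, hd⟩ := h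
  rcases hd with hxy | ⟨q, hcq, hq0, hxy⟩
  · rw [hxy, hc, hr, flush_eq (hc ▸ hok)]
  · rw [hxy, hcq, ← hc, ← hr, hcq]
    simp only [aFlush, bFlush]
    rw [if_neg hq0, PySem.Dict.insert_insert_self]

theorem step_rel (spoken : List String) (s : String)
    (hs : "" ∈ spoken → s ≠ "")
    (x y : PySem.Dict String String × Option String × String) (h : StRel x y) :
    StRel (aSentStep spoken x s) (bSentStep (PySem.Set.ofList spoken) y s) := by
  obtain ⟨hc, hr, hok, hd⟩ := h
  by_cases hm : PySem.Str.lower s ∈ spoken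
  · have hlow : PySem.Str.lower s ≠ "" := by
      intro he
      exact (hs (he ▸ hm)) (lower_eq_empty he)
    have hQ := cap_ne_empty hlow
    obtain ⟨d', hfold, hd'⟩ := inner_mem hm hQ x.1 x.2.1 x.2.2
    have hbm : PySem.Set.contains (PySem.Set.ofList spoken) (PySem.Str.lower s) = true := by
      simp [pysem, hm]
    have hflush : aFlush x.1 x.2.1 x.2.2 = bFlush y.1 y.2.1 y.2.2 :=
      final_eq ⟨hc, hr, hok, hd⟩
    have ha : aSentStep spoken x s = (d', some (pyCapitalize (PySem.Str.lower s)), "") := by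
      show (match spoken.foldl (aInnerStep (PySem.Str.lower s)) (false, x.1, x.2.1, x.2.2) with
            | inner => if inner.1 = true then inner.2
                       else (inner.2.1, inner.2.2.1, inner.2.2.2 ++ (s ++ ". "))) = _
      rw [hfold]; rfl
    have hb : bSentStep (PySem.Set.ofList spoken) y s
        = (bFlush y.1 y.2.1 y.2.2, some (pyCapitalize (PySem.Str.lower s)), "") := by
      show (if PySem.Set.contains (PySem.Set.ofList spoken) (PySem.Str.lower s) = true
            then (bFlush y.1 y.2.1 y.2.2, some (pyCapitalize (PySem.Str.lower s)), "")
            else (y.1, y.2.1, y.2.2 ++ (s ++ ". "))) = _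
      rw [hbm]; rfl
    rw [ha, hb]
    refine ⟨rfl, rfl, fun q hq => by injection hq with h'; exact h' ▸ hQ, ?_⟩
    rcases hd' with h' | h'
    · exact Or.inl (h'.trans hflush)
    · exact Or.inr ⟨pyCapitalize (PySem.Str.lower s), rfl, hQ, by rw [h', hflush]⟩
  · have hfold : spoken.foldl (aInnerStep (PySem.Str.lower s)) (false, x.1, x.2.1, x.2.2)
        = (false, x.1, x.2.1, x.2.2) := inner_no hm _
    have hbm : PySem.Set.contains (PySem.Set.ofList spoken) (PySem.Str.lower s) = false := by
      simp [pysem, hm]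
    have ha : aSentStep spoken x s = (x.1, x.2.1, x.2.2 ++ (s ++ ". ")) := by
      show (match spoken.foldl (aInnerStep (PySem.Str.lower s)) (false, x.1, x.2.1, x.2.2) with
            | inner => if inner.1 = true then inner.2
                       else (inner.2.1, inner.2.2.1, inner.2.2.2 ++ (s ++ ". "))) = _
      rw [hfold]; rfl
    have hb : bSentStep (PySem.Set.ofList spoken) y s = (y.1, y.2.1, y.2.2 ++ (s ++ ". ")) := by
      show (if PySem.Set.contains (PySem.Set.ofList spoken) (PySem.Str.lower s) = true
            then (bFlush y.1 y.2.1 y.2.2, some (pyCapitalize (PySem.Str.lower s)), "")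
            else (y.1, y.2.1, y.2.2 ++ (s ++ ". "))) = _
      rw [hbm]; rfl
    rw [ha, hb]
    exact ⟨hc, by rw [hr], hok, hd⟩

theorem main_fold (spoken : List String) (sents : List String)
    (hp : "" ∈ spoken → ∀ s ∈ sents, s ≠ "")
    (x y : PySem.Dict String String × Option String × String) (h : StRel x y) :
    StRel (sents.foldl (aSentStep spoken) x) (sents.foldl (bSentStep (PySem.Set.ofList spoken)) y) := by
  induction sents generalizing x y with
  | nil => exact h
  | cons s sents ih =>
      simp only [List.foldl_cons]
      exact ih (fun he t ht => hp he t (List.mem_cons_of_mem _ ht)) _ _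
        (step_rel spoken s (fun he => hp he s List.mem_cons_self) x y h)

-- ===== VERDICT (by name: the statement is the Claim_ definition above) =====
theorem get_qanda_spec : Claim_equal_get_qanda := by
  intro sentences spoken_questions _ hpre
  unfold Spec_get_qanda get_qanda get_qanda_alt
  have hp : "" ∈ spoken_questions → ∀ s ∈ sentences, s ≠ "" := by
    intro he s hsm hse
    exact hpre ⟨hse ▸ hsm, he⟩
  have hrel := main_fold spoken_questions sentences hp
    (PySem.Dict.empty, none, "") (PySem.Dict.empty, none, "")
    ⟨rfl, rfl, fun q hq => False.elim (by simp at hq), Or.inl rfl⟩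
  have hfin := final_eq hrel
  exact congrArg PySem.Dict.items hfin
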